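-- pv_equiv track=rewrite | github.com/sattva2020/tg-video-stream | backend/src/middleware/sliding_session.py | _is_public_endpoint
-- ===== SOURCE A (Python) =====
-- def _is_public_endpoint(path: str) -> bool:
--     """Проверяет, является ли эндпоинт публичным (не требует авторизации)."""
--     public_paths = [
--         "/",
--         "/health",
--         "/api/auth/google",
--         "/api/auth/google/callback",
--         "/api/auth/telegram-widget",
--         "/api/auth/telegram-login",
--         "/api/auth/logout",
--         "/api/health",
--         "/docs",
--         "/redoc",
--         "/openapi.json",
--     ]
--
--     # Точное совпадение
--     if path in public_paths:
--         return True
--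
--     # Начинается с публичного пути
--     for public_path in public_paths:
--         if path.startswith(public_path + "/"):
--             return True
--
--     return False
-- ===== SOURCE B (Python) =====
-- PUBLIC_SEGS = {
--     ("", ""),
--     ("", "health"),
--     ("", "api", "auth", "google"),
--     ("", "api", "auth", "google", "callback"),
--     ("", "api", "auth", "telegram-widget"),
--     ("", "api", "auth", "telegram-login"),
--     ("", "api", "auth", "logout"),
--     ("", "api", "health"),
--     ("", "docs"),
--     ("", "redoc"),
--     ("", "openapi.json"),
-- }
--
--
-- def _is_public_endpoint(path: str) -> bool:
--     """Проверяет, является ли эндпоинт публичным (не требует авторизации)."""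
--     # Segment-based matching: a path is public iff the segment tuple of some
--     # public path is a prefix of the path's '/'-split segments (this covers
--     # both the exact match and the path-under-a-public-prefix case).
--     segs = tuple(path.split("/"))
--     return any(segs[:n] in PUBLIC_SEGS for n in (2, 3, 4, 5))
-- ===== Notes on version B (the rewrite author's own statement) =====
-- stated objective: alternative
-- what changed: B splits the path into '/'-segments once and makes four length-truncation probes of a set of public segment tuples (a public path's segments being a prefix of the path's segments covers both the exact-match and the startswith cases), instead of A's loop over the string whitelist with an exact membership test plus per-entry startswith.
import Mathlib
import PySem

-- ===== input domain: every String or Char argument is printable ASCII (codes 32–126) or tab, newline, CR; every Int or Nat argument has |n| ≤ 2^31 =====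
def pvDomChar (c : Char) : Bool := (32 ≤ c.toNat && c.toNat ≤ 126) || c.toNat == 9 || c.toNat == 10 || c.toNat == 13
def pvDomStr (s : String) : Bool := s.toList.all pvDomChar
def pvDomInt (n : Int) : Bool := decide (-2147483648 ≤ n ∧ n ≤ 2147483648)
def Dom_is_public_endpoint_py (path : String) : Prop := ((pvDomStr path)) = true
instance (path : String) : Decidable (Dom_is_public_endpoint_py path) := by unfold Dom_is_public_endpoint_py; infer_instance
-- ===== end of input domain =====

-- B matches by '/'-segments instead of strings: it splits the path once and asks whether the
-- segment tuple of some public path is a prefix of the path's segments (4 truncation probes),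
-- rather than A's loop over the string whitelist with an exact test plus startswith.

-- ===== PORT A =====
-- strings handled as List Char (PySem convention); `path in public_paths` is List.contains,
-- the for-loop with early return is List.any, startswith is PySem.Chars.startswith — exact.
def pubPathsA : List (List Char) :=
  ["/".toList, "/health".toList, "/api/auth/google".toList, "/api/auth/google/callback".toList,
   "/api/auth/telegram-widget".toList, "/api/auth/telegram-login".toList, "/api/auth/logout".toList,
   "/api/health".toList, "/docs".toList, "/redoc".toList, "/openapi.json".toList]

def is_public_endpoint_py (path : String) : Bool :=
  let l := path.toList
  if pubPathsA.contains l then true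
  else pubPathsA.any (fun p => PySem.Chars.startswith l (p ++ ['/']))

-- ===== PORT B =====
-- Source B's PUBLIC_SEGS set of segment tuples (variable arity, so List of segment lists, distinct)
def pubSegsB : List (List (List Char)) :=
  [[[], []],
   [[], "health".toList],
   [[], "api".toList, "auth".toList, "google".toList],
   [[], "api".toList, "auth".toList, "google".toList, "callback".toList],
   [[], "api".toList, "auth".toList, "telegram-widget".toList],
   [[], "api".toList, "auth".toList, "telegram-login".toList],
   [[], "api".toList, "auth".toList, "logout".toList],
   [[], "api".toList, "health".toList],
   [[], "docs".toList], [[], "redoc".toList], [[], "openapi.json".toList]]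

-- path.split("/") is PySem.Chars.splitOn, segs[:n] is PySem.List.slice, `in` the set is contains
def is_public_endpoint_py_alt (path : String) : Bool :=
  let segs := PySem.Chars.splitOn path.toList ['/']
  [(2 : Int), 3, 4, 5].any (fun n => pubSegsB.contains (PySem.List.slice segs none (some n)))

-- ===== PRECONDITION & SPEC =====
def Spec_is_public_endpoint_py (path : String) (out : Bool) : Prop := out = is_public_endpoint_py_alt path
instance (path : String) (out : Bool) : Decidable (Spec_is_public_endpoint_py path out) := by unfold Spec_is_public_endpoint_py; infer_instance

-- ===== CLAIM (what is proved, stated in full; the proofs are below) =====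
def Claim_equal_is_public_endpoint_py : Prop := ∀ (path : String), Dom_is_public_endpoint_py path → Spec_is_public_endpoint_py path (is_public_endpoint_py path)

-- ===== LEMMAS AND PROOFS =====

-- proof-side model of splitting on '/'
def splitSlash : List Char → List (List Char)
  | [] => [[]]
  | c :: t =>
    if c = '/' then [] :: splitSlash t
    else
      match splitSlash t with
      | [] => [[c]]
      | h :: r => (c :: h) :: r

def joinSlash : List (List Char) → List Char
  | [] => []
  | [s] => s
  | s :: r => s ++ '/' :: joinSlash r

theorem splitSlash_ne_nil (l : List Char) : splitSlash l ≠ [] := by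
  cases l with
  | nil => simp [splitSlash]
  | cons c t =>
    simp only [splitSlash]
    split_ifs
    · simp
    · cases h : splitSlash t <;> simp

theorem splitSlash_cases (l : List Char) :
    ((('/' : Char) ∉ l) ∧ splitSlash l = [l]) ∨
      ∃ a b, (('/' : Char) ∉ a) ∧ l = a ++ '/' :: b ∧ splitSlash l = a :: splitSlash b := by
  induction l with
  | nil => exact Or.inl ⟨by simp, rfl⟩
  | cons c t ih =>
    by_cases hc : c = '/'
    · subst hc
      exact Or.inr ⟨[], t, by simp, rfl, by simp [splitSlash]⟩
    · rcases ih with ⟨hns, hsp⟩ | ⟨a, b, hna, hab, hsp⟩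
      · refine Or.inl ⟨?_, by simp [splitSlash, hc, hsp]⟩
        intro hm
        rcases List.mem_cons.mp hm with h | h
        · exact hc h.symm
        · exact hns h
      · refine Or.inr ⟨c :: a, b, ?_, by simp [hab], ?_⟩
        · intro hm
          rcases List.mem_cons.mp hm with h | h
          · exact hc h.symm
          · exact hna h
        · cases h : splitSlash b with
          | nil => exact absurd h (splitSlash_ne_nil b)
          | cons h' r' =>
            rw [h] at hsp
            simp [splitSlash, hc, hsp]

theorem splitSlash_no_slash (l : List Char) : ∀ s ∈ splitSlash l, ('/' : Char) ∉ s := by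
  induction l with
  | nil => intro s hs; simp [splitSlash] at hs; simp [hs]
  | cons c t ih =>
    intro s hs
    by_cases hc : c = '/'
    · subst hc
      have hs' : s = [] ∨ s ∈ splitSlash t := by
        simpa [splitSlash] using hs
      rcases hs' with hs' | hs'
      · simp [hs']
      · exact ih s hs' 
    · cases h : splitSlash t with
      | nil => exact absurd h (splitSlash_ne_nil t)
      | cons h' r' =>
        simp only [splitSlash, if_neg hc, h] at hs
        rcases List.mem_cons.mp hs with rfl | hs'
        · intro hmem
          rcases List.mem_cons.mp hmem with h1 | h2
          · exact hc h1.symm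
          · exact ih h' (h ▸ List.mem_cons_self ..) h2
        · exact ih s (h ▸ List.mem_cons_of_mem _ hs')

theorem joinSlash_splitSlash (l : List Char) : joinSlash (splitSlash l) = l := by
  induction l with
  | nil => rfl
  | cons c t ih =>
    by_cases hc : c = '/'
    · subst hc
      have hne := splitSlash_ne_nil t
      simp only [splitSlash]
      cases h : splitSlash t with
      | nil => exact absurd h hne
      | cons h' r' => rw [h] at ih; simpa [joinSlash] using ih
    · cases h : splitSlash t with
      | nil => exact absurd h (splitSlash_ne_nil t)
      | cons h' r' =>
        simp only [splitSlash, if_neg hc, h]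
        rw [h] at ih
        cases r' with
        | nil => simpa [joinSlash] using congrArg (c :: ·) ih
        | cons h2 r2 => simpa [joinSlash] using congrArg (c :: ·) ih

-- first-slash rigidity: slash-free heads of an 'x ++ '/' :: y' decomposition agree
theorem slash_decomp_unique (s : List Char) : ∀ (a u v : List Char),
    ('/' : Char) ∉ s → ('/' : Char) ∉ a → s ++ '/' :: u = a ++ '/' :: v → s = a ∧ u = v := by
  induction s with
  | nil =>
    intro a u v _ hna h
    cases a with
    | nil => simpa using h
    | cons d a' =>
      simp only [List.nil_append, List.cons_append, List.cons.injEq] at h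
      exact absurd (h.1 ▸ List.mem_cons_self ..) hna
  | cons c s' ih =>
    intro a u v hns hna h
    cases a with
    | nil =>
      simp only [List.cons_append, List.nil_append, List.cons.injEq] at h
      exact absurd (h.1 ▸ List.mem_cons_self ..) hns
    | cons d a' =>
      simp only [List.cons_append, List.cons.injEq] at h
      obtain ⟨rfl, h2⟩ := h
      have := ih a' u v (fun hm => hns (List.mem_cons_of_mem _ hm))
        (fun hm => hna (List.mem_cons_of_mem _ hm)) h2
      exact ⟨by rw [this.1], this.2⟩

theorem slash_prefix_iff (s a x b : List Char) (hns : ('/' : Char) ∉ s) (hna : ('/' : Char) ∉ a) :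
    (s ++ '/' :: x <+: a ++ '/' :: b) ↔ s = a ∧ x <+: b := by
  constructor
  · rintro ⟨u, hu⟩
    rw [List.append_assoc, List.cons_append] at hu
    obtain ⟨rfl, h2⟩ := slash_decomp_unique s a (x ++ u) b hns hna hu
    exact ⟨rfl, u, h2⟩
  · rintro ⟨rfl, u, rfl⟩
    exact ⟨u, by simp⟩

-- the key correspondence: a segment list is a prefix of splitSlash l iff l equals its join
-- or extends it past a '/'
theorem prefix_splitSlash_iff (P : List (List Char)) : ∀ l : List Char, P ≠ [] →
    (∀ s ∈ P, ('/' : Char) ∉ s) →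
    (P <+: splitSlash l ↔ (l = joinSlash P ∨ (joinSlash P ++ ['/']) <+: l)) := by
  induction P with
  | nil => intro l h; exact absurd rfl h
  | cons s P' ih =>
    intro l _ hno
    have hs : ('/' : Char) ∉ s := hno s (List.mem_cons_self ..)
    rcases splitSlash_cases l with ⟨hnl, hsp⟩ | ⟨a, b, hna, rfl, hsp⟩
    · rw [hsp]
      cases P' with
      | nil =>
        simp only [joinSlash]
        constructor
        · rintro ⟨u, hu⟩
          simp only [List.singleton_append] at hu
          rcases u with _ | ⟨_, _⟩
          · exact Or.inl (by simpa using hu.symm)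
          · simp at hu
        · rintro (rfl | ⟨u, hu⟩)
          · exact ⟨[], by simp⟩
          · exact absurd (hu ▸ (List.mem_append.mpr (Or.inl (by simp)))) hnl
      | cons h2 r2 =>
        constructor
        · intro hpre
          have := hpre.length_le
          simp at this
        · rintro (rfl | ⟨u, hu⟩)
          · exact absurd (show ('/':Char) ∈ joinSlash (s :: h2 :: r2) from
              List.mem_append.mpr (Or.inr (List.mem_cons_self ..))) hnl
          · refine absurd ?_ hnl
            rw [← hu]
            exact List.mem_append.mpr (Or.inl (List.mem_append.mpr (Or.inl
              (by simp [joinSlash]))))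
    · rw [hsp, List.cons_prefix_cons]
      cases P' with
      | nil =>
        simp only [joinSlash]
        constructor
        · rintro ⟨rfl, -⟩
          exact Or.inr ⟨b, by simp⟩
        · rintro (h | hpre)
          · exact absurd (h ▸ (List.mem_append.mpr (Or.inr (by simp)) : ('/':Char) ∈ _)) hs
          · rcases hpre with ⟨u, hu⟩
            rw [List.append_assoc] at hu
            obtain ⟨rfl, -⟩ := slash_decomp_unique s a _ b hs hna (by simpa using hu)
            exact ⟨rfl, List.nil_prefix⟩
      | cons h2 r2 =>
        have hjoin : joinSlash (s :: h2 :: r2) = s ++ '/' :: joinSlash (h2 :: r2) := rfl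
        have hno' : ∀ t ∈ h2 :: r2, ('/' : Char) ∉ t := fun t ht => hno t (List.mem_cons_of_mem _ ht)
        rw [hjoin]
        have ihb := ih b (by simp) hno'
        constructor
        · rintro ⟨rfl, hpre⟩
          rcases ihb.mp hpre with h | ⟨u, hu⟩
          · exact Or.inl (by rw [h])
          · exact Or.inr ⟨u, by simp [← hu]⟩
        · rintro (heq | hpre)
          · obtain ⟨rfl, rfl⟩ := slash_decomp_unique a s b (joinSlash (h2 :: r2)) hna hs heq
            exact ⟨rfl, ihb.mpr (Or.inl rfl)⟩
          · simp only [List.append_assoc, List.cons_append] at hpre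
            obtain ⟨rfl, hx⟩ := (slash_prefix_iff s a _ b hs hna).mp hpre
            exact ⟨rfl, ihb.mpr (Or.inr hx)⟩

-- PySem's split (fueled) agrees with the proof-side model for the single-char separator '/'
theorem splitOn_go_eq (fuel : Nat) : ∀ (l cur : List Char) (acc : List (List Char)),
    l.length < fuel →
    PySem.Chars.splitOn.go ['/'] fuel l cur acc =
      acc.reverse ++
        (match splitSlash l with
         | [] => [cur.reverse]
         | h :: r => (cur.reverse ++ h) :: r) := by
  induction fuel with
  | zero => intro l cur acc h; omega
  | succ fuel ih =>
    intro l cur acc hlt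
    cases l with
    | nil => simp [PySem.Chars.splitOn.go, splitSlash]
    | cons c rest =>
      by_cases hc : c = '/'
      · subst hc
        rw [PySem.Chars.splitOn.go]
        simp only [List.isPrefixOf, beq_self_eq_true, Bool.true_and, if_pos]
        have hdrop : List.drop (['/'] : List Char).length ('/' :: rest) = rest := rfl
        rw [hdrop, ih rest [] (cur.reverse :: acc) (by simpa using Nat.lt_of_succ_lt_succ hlt)]
        have hne := splitSlash_ne_nil rest
        cases h : splitSlash rest with
        | nil => exact absurd h hne
        | cons h' r' => simp [splitSlash, h]
      · rw [PySem.Chars.splitOn.go]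
        have hpre : (['/'].isPrefixOf (c :: rest)) = false := by
          simp [List.isPrefixOf]; exact fun h => absurd h.symm hc
        rw [if_neg (by simp [hpre])]
        rw [ih rest (c :: cur) acc (by simpa using Nat.lt_of_succ_lt_succ hlt)]
        have hne := splitSlash_ne_nil rest
        cases h : splitSlash rest with
        | nil => exact absurd h hne
        | cons h' r' => simp [splitSlash, hc, h]

theorem splitOn_eq_splitSlash (l : List Char) :
    PySem.Chars.splitOn l ['/'] = splitSlash l := by
  unfold PySem.Chars.splitOn
  rw [splitOn_go_eq (l.length + 1) l [] [] (by omega)]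
  have hne := splitSlash_ne_nil l
  cases h : splitSlash l with
  | nil => exact absurd h hne
  | cons h' r' => simp

-- B's four truncation probes hit exactly the public segment-prefixes
theorem B_iff (l : List Char) :
    (([(2 : Int), 3, 4, 5].any
        (fun n => pubSegsB.contains (PySem.List.slice (splitSlash l) none (some n)))) = true)
      ↔ ∃ P ∈ pubSegsB, P <+: splitSlash l := by
  constructor
  · intro h
    rcases List.any_eq_true.mp h with ⟨n, hn, hcon⟩
    have hn0 : 0 ≤ n := by
      have : n = 2 ∨ n = 3 ∨ n = 4 ∨ n = 5 := by simpa using hn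
      omega
    rw [PySem.List.slice_to _ hn0] at hcon
    exact ⟨_, List.contains_iff_mem.mp hcon, List.take_prefix _ _⟩
  · rintro ⟨P, hP, hpre⟩
    have hlen : (P.length = 2 ∨ P.length = 3 ∨ P.length = 4 ∨ P.length = 5) := by
      fin_cases hP <;> simp
    have htake : (splitSlash l).take P.length = P := (List.prefix_iff_eq_take.mp hpre).symm
    refine List.any_eq_true.mpr ⟨(P.length : Int), ?_, ?_⟩
    · rcases hlen with h | h | h | h <;> simp [h]
    · rw [PySem.List.slice_to _ (by positivity)]
      simp only [Int.toNat_natCast, htake]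
      exact List.contains_iff_mem.mpr hP

-- A's whitelist loop as an existential
theorem A_iff (l : List Char) :
    ((if pubPathsA.contains l then true
      else pubPathsA.any (fun p => PySem.Chars.startswith l (p ++ ['/']))) = true)
      ↔ ∃ p ∈ pubPathsA, (l = p ∨ (p ++ ['/']) <+: l) := by
  split_ifs with h
  · simp only [true_iff]
    exact ⟨l, List.contains_iff_mem.mp h, Or.inl rfl⟩
  · rw [List.any_eq_true]
    constructor
    · rintro ⟨p, hp, hsw⟩
      exact ⟨p, hp, Or.inr ((PySem.Chars.startswith_iff _ _).mp hsw)⟩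
    · rintro ⟨p, hp, rfl | hpre⟩
      · exact absurd (List.contains_iff_mem.mpr hp) (by simpa using h)
      · exact ⟨p, hp, (PySem.Chars.startswith_iff _ _).mpr hpre⟩

theorem pubSegsB_eq_map : pubSegsB = pubPathsA.map splitSlash := by decide

-- ===== VERDICT (by name: the statement is the Claim_ definition above) =====
theorem is_public_endpoint_py_spec : Claim_equal_is_public_endpoint_py := by
  intro path _
  unfold Spec_is_public_endpoint_py is_public_endpoint_py is_public_endpoint_py_alt
  rw [Bool.eq_iff_iff, splitOn_eq_splitSlash, A_iff, B_iff, pubSegsB_eq_map]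
  constructor
  · rintro ⟨p, hp, hcase⟩
    refine ⟨splitSlash p, List.mem_map_of_mem hp, ?_⟩
    refine (prefix_splitSlash_iff (splitSlash p) path.toList (splitSlash_ne_nil p)
      (splitSlash_no_slash p)).mpr ?_
    rw [joinSlash_splitSlash]
    exact hcase
  · rintro ⟨P, hP, hpre⟩
    rcases List.mem_map.mp hP with ⟨p, hp, rfl⟩
    refine ⟨p, hp, ?_⟩
    have := (prefix_splitSlash_iff (splitSlash p) path.toList (splitSlash_ne_nil p)
      (splitSlash_no_slash p)).mp hpre
    rwa [joinSlash_splitSlash] at this
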